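-- pv_equiv track=rewrite | github.com/young5454/BI-2 | week2/CodeChallenge0202.py | SumDegreeCount
-- ===== SOURCE A (Python) =====
-- def NodeList(dict):
--     node_list = []
--     for key in dict.keys():
--         node_list.append(key)
--     for valuelist in dict.values():
--         for value in valuelist:
--             node_list.append(value)
--     node_list = set(node_list)
--     return node_list
--
-- def OutDegreeCount(dict):
--     outdegreedic = {}
--     for key in dict.keys():
--         outdegreedic[key] = len(dict[key])
--     return outdegreedic
--
-- def InDegreeCount(dict):
--     indegreedic = {}
--     valuelist = []
--     for value in dict.values():
--         valuelist = valuelist + value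
--     for key in NodeList(dict):
--         indegreedic[key] = valuelist.count(key)
--     return indegreedic
--
-- def SumDegreeCount(dict):
--     outdegreedic = OutDegreeCount(dict)
--     indegreedic = InDegreeCount(dict)
--     sumdegreedic = {}
--     for key in outdegreedic.keys():
--         sum = outdegreedic[key] + indegreedic[key]
--         sumdegreedic[key] = sum
--     return sumdegreedic
-- ===== SOURCE B (Python) =====
-- def SumDegreeCount(dict):
--     result = {k: len(v) for k, v in dict.items()}
--     for valuelist in dict.values():
--         for node in valuelist:
--             if node in result:
--                 result[node] += 1
--     return result
-- ===== Notes on version B (the rewrite author's own statement) =====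
-- stated objective: faster
-- what changed: B builds the result directly as {k: len(v)} keyed on the original keys and folds in-degrees in with one guarded in-place increment pass over the value lists, eliminating NodeList, the two separate degree dicts and the per-node valuelist.count scan.
import Mathlib
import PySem

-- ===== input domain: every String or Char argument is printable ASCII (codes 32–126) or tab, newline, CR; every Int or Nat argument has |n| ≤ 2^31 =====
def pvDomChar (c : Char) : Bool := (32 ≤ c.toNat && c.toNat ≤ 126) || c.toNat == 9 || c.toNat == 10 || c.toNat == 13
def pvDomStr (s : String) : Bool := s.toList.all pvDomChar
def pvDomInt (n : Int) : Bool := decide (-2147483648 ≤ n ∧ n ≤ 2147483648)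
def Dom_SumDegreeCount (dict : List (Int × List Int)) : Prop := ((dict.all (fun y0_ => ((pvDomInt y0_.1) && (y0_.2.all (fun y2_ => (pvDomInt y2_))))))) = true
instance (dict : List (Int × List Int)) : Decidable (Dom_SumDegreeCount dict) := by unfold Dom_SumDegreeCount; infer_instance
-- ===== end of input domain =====

-- B folds in-degrees into the {key: out-degree} dict with one guarded in-place increment pass,
-- dropping NodeList, the two separate degree dicts and the per-node count scan (objective: faster).


-- ===== PORT A =====
-- node_list = keys, then every value of every value list, made a set
def NodeListA (dict : List (Int × List Int)) : PySem.Set Int :=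
  let nl : List Int := dict.foldl (fun acc kv => acc ++ [kv.1]) []
  let nl : List Int := dict.foldl (fun acc kv => kv.2.foldl (fun a v => a ++ [v]) acc) nl
  PySem.Set.ofList nl

-- outdegreedic[key] = len(dict[key]); dict[key] is a lookup of a present key, so the
-- KeyError branch of Python's dict[...] is unreachable and get? ... |>.getD [] is exact.
def OutDegreeCountA (dict : List (Int × List Int)) : PySem.Dict Int Int :=
  dict.foldl
    (fun acc kv => acc.insert kv.1 (Int.ofNat (((PySem.Dict.mk dict).get? kv.1 |>.getD []).length)))
    PySem.Dict.empty

-- valuelist = concatenation of all value lists; indegreedic[key] = valuelist.count(key)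
-- (the Set is only used to key a dict that is looked up afterwards, so iteration order is immaterial)
def InDegreeCountA (dict : List (Int × List Int)) : PySem.Dict Int Int :=
  let vl : List Int := dict.foldl (fun acc kv => acc ++ kv.2) []
  (NodeListA dict).foldl (fun acc k => acc.insert k (Int.ofNat (vl.count k))) PySem.Dict.empty

def SumDegreeCount (dict : List (Int × List Int)) : List (Int × Int) :=
  let odc := OutDegreeCountA dict
  let idc := InDegreeCountA dict
  let sdd : PySem.Dict Int Int :=
    odc.keys.foldl
      (fun acc key => acc.insert key ((odc.get? key |>.getD 0) + (idc.get? key |>.getD 0)))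
      PySem.Dict.empty
  sdd.items

-- ===== PORT B =====
def SumDegreeCount_alt (dict : List (Int × List Int)) : List (Int × Int) :=
  -- result = {k: len(v) for k, v in dict.items()}
  let result : PySem.Dict Int Int :=
    dict.foldl (fun acc kv => acc.insert kv.1 (Int.ofNat kv.2.length)) PySem.Dict.empty
  -- for valuelist in dict.values(): for node in valuelist: if node in result: result[node] += 1
  let result : PySem.Dict Int Int :=
    dict.foldl
      (fun res kv =>
        kv.2.foldl
          (fun r node => if r.contains node then r.insert node ((r.get? node |>.getD 0) + 1) else r)
          res)
      result
  result.items

-- ===== PRECONDITION & SPEC =====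
-- Pre_ excludes association lists with duplicate keys: a Python dict cannot represent them,
-- so the list ports' behaviour there corresponds to no Python input.
def Pre_SumDegreeCount (dict : List (Int × List Int)) : Prop := (dict.map Prod.fst).Nodup
instance (dict : List (Int × List Int)) : Decidable (Pre_SumDegreeCount dict) := by
  unfold Pre_SumDegreeCount; infer_instance
def pvWitness_SumDegreeCount : (List (Int × List Int)) := [(1, [2, 2]), (2, [1]), (5, [])]

def Spec_SumDegreeCount (dict : List (Int × List Int)) (out : List (Int × Int)) : Prop := out = SumDegreeCount_alt dict
instance (dict : List (Int × List Int)) (out : List (Int × Int)) : Decidable (Spec_SumDegreeCount dict out) := by unfold Spec_SumDegreeCount; infer_instance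

-- ===== CLAIM (what is proved, stated in full; the proofs are below) =====
def Claim_equal_SumDegreeCount : Prop := ∀ (dict : List (Int × List Int)), Dom_SumDegreeCount dict → Pre_SumDegreeCount dict → Spec_SumDegreeCount dict (SumDegreeCount dict)

-- ===== LEMMAS AND PROOFS =====

-- general fact specific to our two loops: appending values one by one is flatMap of the value lists
theorem pv_foldl_values (dict : List (Int × List Int)) (init : List Int) :
    dict.foldl (fun acc kv => kv.2.foldl (fun a v => a ++ [v]) acc) init
      = init ++ dict.flatMap Prod.snd := by
  rw [PySem.List.foldl_congr_mem (g := fun acc kv => acc ++ kv.2)]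
  · exact PySem.List.foldl_append_eq_flatMap _ _ _
  · intro acc x _; rw [PySem.List.foldl_append_singleton_eq_self]

theorem pv_NodeListA_eq (dict : List (Int × List Int)) :
    NodeListA dict = PySem.Set.ofList (dict.map Prod.fst ++ dict.flatMap Prod.snd) := by
  simp only [NodeListA]
  rw [PySem.List.foldl_append_singleton_eq_map (f := Prod.fst), pv_foldl_values]
  rfl

-- a key-indexed insert loop over the (Nodup) input pairs, starting empty, lists its inserts
theorem pv_insert_loop_items (dict : List (Int × List Int)) (h : (dict.map Prod.fst).Nodup)
    (f : (Int × List Int) → Int) :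
    (dict.foldl (fun acc kv => acc.insert kv.1 (f kv)) PySem.Dict.empty).items
      = dict.map (fun kv => (kv.1, f kv)) := by
  rw [PySem.Dict.items_foldl_insert_fresh (k := Prod.fst) (v := f)]
  · rfl
  · intro a _; simp
  · exact h

theorem pv_id_insert_loop_items (l : List Int) (h : l.Nodup) (f : Int → Int) :
    (l.foldl (fun acc k => acc.insert k (f k)) PySem.Dict.empty).items
      = l.map (fun k => (k, f k)) := by
  rw [PySem.Dict.items_foldl_insert_fresh (k := fun a => a) (v := f)]
  · rfl
  · intro a _; simp
  · simpa using h

theorem SumDegreeCount_A_closed (dict : List (Int × List Int))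
    (h : (dict.map Prod.fst).Nodup) :
    SumDegreeCount dict =
      dict.map (fun kv => (kv.1, (kv.2.length : Int) + ((dict.flatMap Prod.snd).count kv.1 : Int))) := by
  have hodc : (OutDegreeCountA dict).items
      = dict.map (fun kv => (kv.1, Int.ofNat (((PySem.Dict.mk dict).get? kv.1 |>.getD []).length))) :=
    pv_insert_loop_items dict h _
  have hodck : (OutDegreeCountA dict).keys = dict.map Prod.fst := by
    show (OutDegreeCountA dict).items.map Prod.fst = _
    rw [hodc]; simp
  have hodcnd : (OutDegreeCountA dict).keys.Nodup := by rw [hodck]; exact h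
  have hNLnd : (NodeListA dict : List Int).Nodup := by
    rw [pv_NodeListA_eq]; exact PySem.Set.nodup_ofList _
  have hidc : (InDegreeCountA dict).items
      = (NodeListA dict).map (fun k => (k, Int.ofNat ((dict.flatMap Prod.snd).count k))) := by
    simp only [InDegreeCountA]
    rw [PySem.List.foldl_append_eq_flatMap]
    exact pv_id_insert_loop_items _ hNLnd _
  have hidcnd : (InDegreeCountA dict).keys.Nodup := by
    show (InDegreeCountA dict).items.map Prod.fst |>.Nodup
    rw [hidc]; simp only [List.map_map]; simpa [Function.comp_def] using hNLnd
  show (((OutDegreeCountA dict).keys).foldl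
      (fun acc key => acc.insert key
        (((OutDegreeCountA dict).get? key |>.getD 0) + ((InDegreeCountA dict).get? key |>.getD 0)))
      PySem.Dict.empty).items = _
  rw [pv_id_insert_loop_items _ hodcnd, hodck, ← List.comp_map]
  refine List.map_congr_left (fun kv hkv => ?_)
  have hget : (PySem.Dict.mk dict).get? kv.1 = some kv.2 :=
    PySem.Dict.get?_of_mem_items (d := PySem.Dict.mk dict) (by simpa using hkv) h
  have hodcget : (OutDegreeCountA dict).get? kv.1 = some (Int.ofNat kv.2.length) := by
    refine PySem.Dict.get?_of_mem_items _ ?_ hodcnd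
    rw [hodc]
    exact List.mem_map.2 ⟨kv, hkv, by rw [hget]; rfl⟩
  have hmemNL : kv.1 ∈ (NodeListA dict : List Int) := by
    rw [pv_NodeListA_eq, PySem.Set.mem_ofList]
    exact List.mem_append_left _ (List.mem_map_of_mem hkv)
  have hidcget : (InDegreeCountA dict).get? kv.1
      = some (Int.ofNat ((dict.flatMap Prod.snd).count kv.1)) := by
    refine PySem.Dict.get?_of_mem_items _ ?_ hidcnd
    rw [hidc]
    exact List.mem_map.2 ⟨kv.1, hmemNL, rfl⟩
  simp [Function.comp, hodcget, hidcget]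

-- the guarded increment of B, named so the fold lemmas below can speak about it
def pvStepB (r : PySem.Dict Int Int) (node : Int) : PySem.Dict Int Int :=
  if r.contains node then r.insert node ((r.get? node |>.getD 0) + 1) else r

theorem pv_foldl_flatten (dict : List (Int × List Int)) (r : PySem.Dict Int Int) :
    dict.foldl (fun res kv => kv.2.foldl pvStepB res) r = (dict.flatMap Prod.snd).foldl pvStepB r := by
  induction dict generalizing r with
  | nil => rfl
  | cons kv t ih => simp [List.foldl_append, ih]

theorem pv_stepB_fold (l : List Int) (r : PySem.Dict Int Int) (h : r.keys.Nodup) :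
    (l.foldl pvStepB r).keys = r.keys ∧
    ∀ k, (l.foldl pvStepB r).getD k 0 = r.getD k 0 + (if r.contains k then (l.count k : Int) else 0) := by
  induction l generalizing r with
  | nil => simp
  | cons n t ih =>
    by_cases hc : r.contains n = true
    · have hstep : pvStepB r n = r.insert n (r.getD n 0 + 1) := by
        simp [pvStepB, hc, PySem.Dict.getD_eq_get?_getD]
      have hkeys : (r.insert n (r.getD n 0 + 1)).keys = r.keys :=
        PySem.Dict.keys_insert_of_contains r _ hc
      have hnd : (r.insert n (r.getD n 0 + 1)).keys.Nodup := hkeys ▸ h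
      obtain ⟨ik, iv⟩ := ih (r.insert n (r.getD n 0 + 1)) hnd
      refine ⟨by simp only [List.foldl_cons, hstep]; rw [ik, hkeys], fun k => ?_⟩
      simp only [List.foldl_cons, hstep]
      rw [iv k, PySem.Dict.getD_insert, PySem.Dict.contains_insert]
      by_cases hk : k = n
      · subst hk; simp [hc]; ring
      · simp [hk, Ne.symm hk]
    · have hstep : pvStepB r n = r := by simp [pvStepB, hc]
      obtain ⟨ik, iv⟩ := ih r h
      refine ⟨by simp only [List.foldl_cons, hstep]; exact ik, fun k => ?_⟩
      simp only [List.foldl_cons, hstep]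
      rw [iv k]
      by_cases hk : k = n
      · subst hk; simp [hc]
      · simp [Ne.symm hk]

theorem SumDegreeCount_B_closed (dict : List (Int × List Int))
    (h : (dict.map Prod.fst).Nodup) :
    SumDegreeCount_alt dict =
      dict.map (fun kv => (kv.1, (kv.2.length : Int) + ((dict.flatMap Prod.snd).count kv.1 : Int))) := by
  have h1 : (dict.foldl (fun acc kv => acc.insert kv.1 (Int.ofNat kv.2.length)) PySem.Dict.empty).items
      = dict.map (fun kv => (kv.1, Int.ofNat kv.2.length)) := pv_insert_loop_items dict h _
  set d1 := dict.foldl (fun acc kv => acc.insert kv.1 (Int.ofNat kv.2.length)) PySem.Dict.empty with hd1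
  have h1k : d1.keys = dict.map Prod.fst := by
    show d1.items.map Prod.fst = _
    rw [h1]; simp
  have h1nd : d1.keys.Nodup := by rw [h1k]; exact h
  show (dict.foldl (fun res kv => kv.2.foldl pvStepB res) d1).items = _
  rw [pv_foldl_flatten]
  obtain ⟨hk2, hv2⟩ := pv_stepB_fold (dict.flatMap Prod.snd) d1 h1nd
  have h2nd : ((dict.flatMap Prod.snd).foldl pvStepB d1).keys.Nodup := by rw [hk2]; exact h1nd
  rw [PySem.Dict.items_eq_map_keys _ h2nd 0, hk2, h1k, ← List.comp_map]
  refine List.map_congr_left (fun kv hkv => ?_)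
  have hmemk : kv.1 ∈ d1.keys := by rw [h1k]; exact List.mem_map_of_mem hkv
  have hcont : d1.contains kv.1 = true := (PySem.Dict.contains_iff_mem_keys _ _).2 hmemk
  have hg1 : d1.getD kv.1 0 = Int.ofNat kv.2.length := by
    refine PySem.Dict.getD_of_mem_items _ ?_ h1nd 0
    rw [h1]
    exact List.mem_map.2 ⟨kv, hkv, rfl⟩
  simp [Function.comp, hv2 kv.1, hcont, hg1]

-- ===== VERDICT (by name: the statement is the Claim_ definition above) =====
theorem SumDegreeCount_spec : Claim_equal_SumDegreeCount := by
  intro dict _ hpre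
  unfold Spec_SumDegreeCount
  rw [SumDegreeCount_A_closed dict hpre, SumDegreeCount_B_closed dict hpre]
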